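-- pv_equiv track=rewrite | github.com/irubab/shortread_evaluator | workflow/scripts/evaluate_alignments_with_cigar.py | cigar_parse_end
-- ===== SOURCE A (Python) =====
-- def cigar_parse_end(cigar_tuples, stop_position, remainder):
--     counter = 0
--     end_position_cigar = 0
--     counter += remainder
--     if counter > stop_position:
--         end_position_cigar = stop_position
--     else:
--         for j in range(len(cigar_tuples)):
--             if cigar_tuples[j][0] == 0 or cigar_tuples[j][0] == 2:  # Handle 'H' and 'S'
--                 counter += cigar_tuples[j][1]
--                 if counter > stop_position:
--                     if cigar_tuples[j][0] == 0:
--                         end_position_cigar += stop_position - (counter - cigar_tuples[j][1])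
--                         break
--                 else:
--                     if cigar_tuples[j][0] == 0:
--                         end_position_cigar += cigar_tuples[j][1]
--                     elif cigar_tuples[j][0] == 2:
--                         continue
--             elif cigar_tuples[j][0] == 1:
--                 end_position_cigar += cigar_tuples[j][1]
--                 continue
--     return end_position_cigar
-- ===== SOURCE B (Python) =====
-- def cigar_parse_end(cigar_tuples, stop_position, remainder):
--     # Two-pass decomposition: find the op-0 tuple where the reference counter
--     # crosses stop_position, then sum matched/inserted lengths before it.
--     if remainder > stop_position:
--         return stop_position
--     cum = remainder
--     brk = None
--     partial = 0
--     for i, (op, ln) in enumerate(cigar_tuples):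
--         if op == 0 or op == 2:
--             if op == 0 and cum + ln > stop_position:
--                 brk = i
--                 partial = stop_position - cum
--                 break
--             cum += ln
--     prefix = cigar_tuples if brk is None else cigar_tuples[:brk]
--     return sum(ln for op, ln in prefix if op == 0 or op == 1) + partial
-- ===== Notes on version B (the rewrite author's own statement) =====
-- stated objective: alternative
-- what changed: Replaces A's single stateful loop (two running accumulators with nested branch/continue/break) by a two-pass decomposition: first locate the op-0 tuple where the reference counter (seeded with remainder) crosses stop_position, then sum the op-0/op-1 lengths of the prefix before it plus the partial overlap.
import Mathlib
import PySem

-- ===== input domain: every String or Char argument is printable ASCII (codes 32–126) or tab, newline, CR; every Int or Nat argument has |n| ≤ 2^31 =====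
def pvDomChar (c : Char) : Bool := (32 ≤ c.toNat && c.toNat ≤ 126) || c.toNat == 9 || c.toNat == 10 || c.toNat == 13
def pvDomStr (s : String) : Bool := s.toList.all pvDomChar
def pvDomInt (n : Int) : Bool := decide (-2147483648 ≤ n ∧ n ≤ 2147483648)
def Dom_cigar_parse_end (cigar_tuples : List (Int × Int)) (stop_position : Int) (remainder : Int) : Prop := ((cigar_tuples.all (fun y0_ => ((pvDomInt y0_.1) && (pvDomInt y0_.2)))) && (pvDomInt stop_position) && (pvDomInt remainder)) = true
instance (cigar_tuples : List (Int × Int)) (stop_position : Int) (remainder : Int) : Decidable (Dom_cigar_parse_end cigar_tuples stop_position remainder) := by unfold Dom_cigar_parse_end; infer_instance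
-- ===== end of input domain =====

-- B re-derives the same end position by a two-pass decomposition (find the crossing
-- op-0 tuple, then sum the prefix) instead of A's single stateful loop; same cost.
-- ===== PORT A =====
-- the for-loop of A with its break/continue, state = (counter, end_position_cigar)
def goA (l : List (Int × Int)) (counter endp stop : Int) : Int :=
  match l with
  | [] => endp
  | (op, ln) :: rest =>
    if op = 0 ∨ op = 2 then
      let c' := counter + ln
      if c' > stop then
        if op = 0 then endp + (stop - (c' - ln))  -- break
        else goA rest c' endp stop
      else
        if op = 0 then goA rest c' (endp + ln) stop
        else goA rest c' endp stop
    else if op = 1 then goA rest counter (endp + ln) stop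
    else goA rest counter endp stop

def cigar_parse_end (cigar_tuples : List (Int × Int)) (stop_position : Int) (remainder : Int) : Int :=
  if remainder > stop_position then stop_position
  else goA cigar_tuples remainder 0 stop_position

-- ===== PORT B =====
-- first pass of Source B: first op-0 tuple where cum + ln > stop; returns (index, partial)
def scanB (l : List (Int × Int)) (cum stop : Int) : Option (Nat × Int) :=
  match l with
  | [] => none
  | (op, ln) :: rest =>
    if op = 0 ∨ op = 2 then
      if op = 0 ∧ cum + ln > stop then some (0, stop - cum)
      else (scanB rest (cum + ln) stop).map (fun p => (p.1 + 1, p.2))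
    else (scanB rest cum stop).map (fun p => (p.1 + 1, p.2))

-- second pass of Source B: sum of lengths with op 0 or 1
def sumB (l : List (Int × Int)) : Int :=
  ((l.filter (fun t => t.1 = 0 ∨ t.1 = 1)).map Prod.snd).sum

def cigar_parse_end_alt (cigar_tuples : List (Int × Int)) (stop_position : Int) (remainder : Int) : Int :=
  if remainder > stop_position then stop_position
  else
    match scanB cigar_tuples remainder stop_position with
    | none => sumB cigar_tuples + 0
    | some (i, p) => sumB (cigar_tuples.take i) + p

-- ===== PRECONDITION & SPEC =====
def Spec_cigar_parse_end (cigar_tuples : List (Int × Int)) (stop_position : Int) (remainder : Int) (out : Int) : Prop := out = cigar_parse_end_alt cigar_tuples stop_position remainder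
instance (cigar_tuples : List (Int × Int)) (stop_position : Int) (remainder : Int) (out : Int) : Decidable (Spec_cigar_parse_end cigar_tuples stop_position remainder out) := by unfold Spec_cigar_parse_end; infer_instance

-- ===== CLAIM (what is proved, stated in full; the proofs are below) =====
def Claim_equal_cigar_parse_end : Prop := ∀ (cigar_tuples : List (Int × Int)) (stop_position : Int) (remainder : Int), Dom_cigar_parse_end cigar_tuples stop_position remainder → Spec_cigar_parse_end cigar_tuples stop_position remainder (cigar_parse_end cigar_tuples stop_position remainder)

-- ===== LEMMAS AND PROOFS =====

-- ===== VERDICT (by name: the statement is the Claim_ definition above) =====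



-- result of B's two passes after the initial guard
def bRes (l : List (Int × Int)) (c stop : Int) : Int :=
  match scanB l c stop with
  | none => sumB l + 0
  | some (i, p) => sumB (l.take i) + p

theorem sumB_cons (op ln : Int) (l : List (Int × Int)) :
    sumB ((op, ln) :: l) = (if op = 0 ∨ op = 1 then ln else 0) + sumB l := by
  simp only [sumB, List.filter_cons]
  split <;> simp_all

theorem bRes_step (op ln : Int) (tl : List (Int × Int)) (o : Option (Nat × Int)) :
    (match o.map (fun p => (p.1 + 1, p.2)) with
      | none => sumB ((op, ln) :: tl) + 0
      | some (i, p) => sumB (((op, ln) :: tl).take i) + p)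
      = (if op = 0 ∨ op = 1 then ln else 0) +
        (match o with
          | none => sumB tl + 0
          | some (i, p) => sumB (tl.take i) + p) := by
  cases o with
  | none => simp [sumB_cons]
  | some v =>
    obtain ⟨i, p⟩ := v
    simp only [Option.map_some, List.take_succ_cons]
    rw [sumB_cons]; ring

theorem goA_eq_bRes (l : List (Int × Int)) (c e stop : Int) :
    goA l c e stop = e + bRes l c stop := by
  induction l generalizing c e with
  | nil => simp [goA, bRes, scanB, sumB]
  | cons hd tl ih =>
    obtain ⟨op, ln⟩ := hd
    simp only [goA, bRes, scanB]
    by_cases h02 : op = 0 ∨ op = 2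
    · simp only [h02, if_true]
      by_cases hb : op = 0 ∧ c + ln > stop
      · obtain ⟨hop, hlt⟩ := hb
        subst hop
        simp only [hlt, if_true, and_true]
        simp [sumB]
      · simp only [hb, if_false]
        rw [bRes_step op ln tl (scanB tl (c + ln) stop)]
        by_cases hc : c + ln > stop
        · have hop2 : op = 2 := by
            rcases h02 with h | h
            · exact absurd ⟨h, hc⟩ hb
            · exact h
          subst hop2
          norm_num [ih, bRes]
        · simp only [hc, if_false]
          rcases h02 with h | h
          · subst h
            norm_num [ih, bRes]
            ring
          · subst h
            norm_num [ih, bRes]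
    · simp only [h02, if_false]
      rw [bRes_step op ln tl (scanB tl c stop)]
      have h0 : ¬ op = 0 := fun h => h02 (Or.inl h)
      by_cases h1 : op = 1
      · subst h1
        norm_num [ih, bRes]
        ring
      · simp [h0, h1, ih, bRes]

theorem cigar_parse_end_spec : Claim_equal_cigar_parse_end := by
  intro ct stop rem _
  unfold Spec_cigar_parse_end cigar_parse_end cigar_parse_end_alt
  by_cases h : rem > stop
  · simp [h]
  · simp only [h, if_false]
    rw [goA_eq_bRes]
    simp [bRes]
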